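-- pv_equiv track=rewrite | github.com/sburdges-eng/miDiKompanion | final kel/lost-and-found/python-packages/kelly 2/src/kelly/engines/voice_leading.py | _check_parallel_octaves
-- ===== SOURCE A (Python) =====
-- from typing import List, Dict, Optional, Tuple
--
-- def _check_parallel_octaves(from_v: List[int], to_v: List[int]) -> bool:
--     """Check for parallel octaves."""
--     from_sorted = sorted(from_v)
--     to_sorted = sorted(to_v)
--
--     for i in range(len(from_sorted) - 1):
--         for j in range(i + 1, len(from_sorted)):
--             from_interval = abs(from_sorted[j] - from_sorted[i]) % 12
--             to_interval = abs(to_sorted[j] - to_sorted[i]) % 12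
--             if from_interval == 0 and to_interval == 0:
--                 return True
--     return False
-- ===== SOURCE B (Python) =====
-- def _check_parallel_octaves(from_v, to_v):
--     """Check for parallel octaves."""
--     seen = set()
--     for f, t in zip(sorted(from_v), sorted(to_v)):
--         key = (f % 12, t % 12)
--         if key in seen:
--             return True
--         seen.add(key)
--     return False
-- ===== Notes on version B (the rewrite author's own statement) =====
-- stated objective: faster
-- what changed: Replaces the nested scan over all position pairs with one pass over the zipped sorted voices that records each (from%12,to%12) residue pair in a set and reports True on the first repeated pair.
-- outside the precondition, e.g. on _check_parallel_octaves([0, 12, 24], [0, 12]): A returns True, B returns True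
import Mathlib
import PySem

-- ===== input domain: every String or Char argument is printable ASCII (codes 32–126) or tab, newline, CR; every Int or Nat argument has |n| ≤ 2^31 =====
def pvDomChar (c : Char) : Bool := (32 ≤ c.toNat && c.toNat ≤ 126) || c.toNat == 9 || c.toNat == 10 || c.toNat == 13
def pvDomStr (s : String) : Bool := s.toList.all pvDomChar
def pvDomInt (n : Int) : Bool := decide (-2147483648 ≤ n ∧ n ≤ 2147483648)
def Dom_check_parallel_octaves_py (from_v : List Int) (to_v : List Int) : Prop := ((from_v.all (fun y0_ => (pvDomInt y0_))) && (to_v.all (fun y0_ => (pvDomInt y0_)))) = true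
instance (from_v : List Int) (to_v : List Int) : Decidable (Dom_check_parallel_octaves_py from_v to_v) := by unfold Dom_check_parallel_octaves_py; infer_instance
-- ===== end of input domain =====

-- B replaces A's nested pair scan with one pass over the zipped sorted voices using a set
-- of (from%12, to%12) residue pairs; objective: faster (asymptotic, O(n log n) vs O(n^2)).


-- ===== PORT A =====
def check_parallel_octaves_py (from_v : List Int) (to_v : List Int) : Bool :=
  let from_sorted := PySem.List.sorted from_v (fun x => x) false
  let to_sorted := PySem.List.sorted to_v (fun x => x) false
  (PySem.List.pyRange 0 ((from_sorted.length : Int) - 1) 1).any (fun i =>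
    (PySem.List.pyRange (i + 1) (from_sorted.length : Int) 1).any (fun j =>
      let from_interval := PySem.Int.mod |PySem.List.pyGetD from_sorted j 0 - PySem.List.pyGetD from_sorted i 0| 12
      let to_interval := PySem.Int.mod |PySem.List.pyGetD to_sorted j 0 - PySem.List.pyGetD to_sorted i 0| 12
      from_interval == 0 && to_interval == 0))

-- ===== PORT B =====
-- the one-pass scan: stop with True on the first repeated (f%12, t%12) residue pair
def pvGoB (seen : PySem.Set (Int × Int)) : List (Int × Int) → Bool
  | [] => false
  | (f, t) :: rest =>
    let key := (PySem.Int.mod f 12, PySem.Int.mod t 12)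
    if PySem.Set.contains seen key then true
    else pvGoB (PySem.Set.add seen key) rest

def check_parallel_octaves_py_alt (from_v : List Int) (to_v : List Int) : Bool :=
  pvGoB PySem.Set.empty
    ((PySem.List.sorted from_v (fun x => x) false).zip (PySem.List.sorted to_v (fun x => x) false))

-- ===== PRECONDITION & SPEC =====
-- Pre_ excludes inputs with 2 ≤ len(from_v) and len(to_v) < len(from_v): there A indexes the
-- sorted to_v at positions of from_v and raises IndexError, except on a few such inputs where
-- an early pair already yields True before the out-of-range access (see the cite in claim.json).
def Pre_check_parallel_octaves_py (from_v : List Int) (to_v : List Int) : Prop :=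
  from_v.length ≤ to_v.length ∨ from_v.length ≤ 1
instance (from_v : List Int) (to_v : List Int) : Decidable (Pre_check_parallel_octaves_py from_v to_v) := by unfold Pre_check_parallel_octaves_py; infer_instance
def pvWitness_check_parallel_octaves_py : List Int × List Int := ([60, 48, 64], [62, 50, 67])
def Spec_check_parallel_octaves_py (from_v : List Int) (to_v : List Int) (out : Bool) : Prop := out = check_parallel_octaves_py_alt from_v to_v
instance (from_v : List Int) (to_v : List Int) (out : Bool) : Decidable (Spec_check_parallel_octaves_py from_v to_v out) := by unfold Spec_check_parallel_octaves_py; infer_instance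

-- ===== CLAIM (what is proved, stated in full; the proofs are below) =====
def Claim_equal_check_parallel_octaves_py : Prop := ∀ (from_v : List Int) (to_v : List Int), Dom_check_parallel_octaves_py from_v to_v → Pre_check_parallel_octaves_py from_v to_v → Spec_check_parallel_octaves_py from_v to_v (check_parallel_octaves_py from_v to_v)

-- ===== LEMMAS AND PROOFS =====

-- the common characterisation: two positions a < b (valid in both sorted lists) whose
-- from-values and to-values agree mod 12
def pvDup (fs ts : List Int) : Prop :=
  ∃ a b : Nat, a < b ∧ b < fs.length ∧ b < ts.length ∧
    fs.getD a 0 % 12 = fs.getD b 0 % 12 ∧ ts.getD a 0 % 12 = ts.getD b 0 % 12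

theorem pvA_iff (fs ts : List Int) (hlen : fs.length ≤ ts.length) :
    ((PySem.List.pyRange 0 ((fs.length : Int) - 1) 1).any (fun i =>
      (PySem.List.pyRange (i + 1) (fs.length : Int) 1).any (fun j =>
        PySem.Int.mod |PySem.List.pyGetD fs j 0 - PySem.List.pyGetD fs i 0| 12 == 0 &&
        PySem.Int.mod |PySem.List.pyGetD ts j 0 - PySem.List.pyGetD ts i 0| 12 == 0))) = true
    ↔ pvDup fs ts := by
  simp only [List.any_eq_true, PySem.List.mem_pyRange_one, Bool.and_eq_true, beq_iff_eq]
  constructor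
  · rintro ⟨i, ⟨hi0, hin⟩, j, ⟨hij, hjn⟩, hcf, hct⟩
    have hj0 : (0:Int) ≤ j := by omega
    rw [PySem.List.pyGetD_of_nonneg fs 0 hj0, PySem.List.pyGetD_of_nonneg fs 0 hi0] at hcf
    rw [PySem.List.pyGetD_of_nonneg ts 0 hj0, PySem.List.pyGetD_of_nonneg ts 0 hi0] at hct
    have hdf : (12:Int) ∣ (fs.getD j.toNat 0 - fs.getD i.toNat 0) :=
      (dvd_abs _ _).mp ((PySem.Int.mod_eq_zero_iff_dvd _ _).mp hcf)
    have hdt : (12:Int) ∣ (ts.getD j.toNat 0 - ts.getD i.toNat 0) :=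
      (dvd_abs _ _).mp ((PySem.Int.mod_eq_zero_iff_dvd _ _).mp hct)
    refine ⟨i.toNat, j.toNat, by omega, by omega, by omega, ?_, ?_⟩
    · rw [Int.emod_eq_emod_iff_emod_sub_eq_zero]
      exact Int.emod_eq_zero_of_dvd (dvd_sub_comm.mp hdf)
    · rw [Int.emod_eq_emod_iff_emod_sub_eq_zero]
      exact Int.emod_eq_zero_of_dvd (dvd_sub_comm.mp hdt)
  · rintro ⟨a, b, hab, hbf, hbt, hf, ht⟩
    refine ⟨(a : Int), ⟨by omega, by omega⟩, (b : Int), ⟨by omega, by omega⟩, ?_, ?_⟩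
    · rw [PySem.List.pyGetD_of_nonneg fs 0 (by omega), PySem.List.pyGetD_of_nonneg fs 0 (by omega),
        Int.toNat_natCast, Int.toNat_natCast, PySem.Int.mod_eq_zero_iff_dvd]
      exact (dvd_abs _ _).mpr (dvd_sub_comm.mp (Int.dvd_of_emod_eq_zero
        (Int.emod_eq_emod_iff_emod_sub_eq_zero.mp hf)))
    · rw [PySem.List.pyGetD_of_nonneg ts 0 (by omega), PySem.List.pyGetD_of_nonneg ts 0 (by omega),
        Int.toNat_natCast, Int.toNat_natCast, PySem.Int.mod_eq_zero_iff_dvd]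
      exact (dvd_abs _ _).mpr (dvd_sub_comm.mp (Int.dvd_of_emod_eq_zero
        (Int.emod_eq_emod_iff_emod_sub_eq_zero.mp ht)))

theorem pvGoB_iff (l : List (Int × Int)) (seen : PySem.Set (Int × Int)) :
    pvGoB seen l = true ↔
      (∃ p ∈ l, ((PySem.Int.mod p.1 12, PySem.Int.mod p.2 12) : Int × Int) ∈ seen) ∨
      ¬ (l.map (fun p => ((PySem.Int.mod p.1 12, PySem.Int.mod p.2 12) : Int × Int))).Nodup := by
  induction l generalizing seen with
  | nil => simp [pvGoB]
  | cons p rest ih =>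
    obtain ⟨f, t⟩ := p
    by_cases h : ((PySem.Int.mod f 12, PySem.Int.mod t 12) : Int × Int) ∈ seen
    · have hc := (PySem.Set.contains_iff seen _).mpr h
      simp only [pvGoB, hc, if_true]
      exact iff_of_true trivial (Or.inl ⟨(f, t), List.mem_cons_self, h⟩)
    · have hc : PySem.Set.contains seen ((PySem.Int.mod f 12, PySem.Int.mod t 12) : Int × Int) = false :=
        Bool.eq_false_iff.mpr (fun hh => h ((PySem.Set.contains_iff seen _).mp hh))
      simp only [pvGoB, hc, Bool.false_eq_true, if_false]
      rw [ih]
      simp only [List.map_cons, List.nodup_cons, List.mem_map, List.mem_cons, PySem.Set.mem_add,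
        not_and]
      constructor
      · rintro (⟨q, hq, hmem | hkey⟩ | hdup)
        · exact Or.inl ⟨q, Or.inr hq, hmem⟩
        · exact Or.inr (fun hnot => absurd ⟨q, hq, hkey⟩ hnot)
        · exact Or.inr (fun _ => hdup)
      · rintro (⟨q, hq | hq, hmem⟩ | himp)
        · subst hq
          exact absurd hmem h
        · exact Or.inl ⟨q, hq, Or.inl hmem⟩
        · by_cases hk : ∃ a ∈ rest,
            ((PySem.Int.mod a.1 12, PySem.Int.mod a.2 12) : Int × Int)
              = (PySem.Int.mod f 12, PySem.Int.mod t 12)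
          · obtain ⟨q, hq, he⟩ := hk
            exact Or.inl ⟨q, hq, Or.inr he⟩
          · exact Or.inr (himp hk)

theorem pvB_iff (fs ts : List Int) :
    pvGoB PySem.Set.empty (fs.zip ts) = true ↔ pvDup fs ts := by
  rw [pvGoB_iff]
  constructor
  · rintro (⟨p, _, hmem⟩ | hnd)
    · simp [PySem.Set.empty] at hmem
    · rw [List.nodup_iff_getElem?_ne_getElem?] at hnd
      push_neg at hnd
      obtain ⟨i, j, hij, hj, he⟩ := hnd
      simp only [List.length_map, List.length_zip] at hj
      have hi' : i < ((fs.zip ts).map (fun p => ((PySem.Int.mod p.1 12, PySem.Int.mod p.2 12) : Int × Int))).length := by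
        simp only [List.length_map, List.length_zip]; omega
      have hj' : j < ((fs.zip ts).map (fun p => ((PySem.Int.mod p.1 12, PySem.Int.mod p.2 12) : Int × Int))).length := by
        simp only [List.length_map, List.length_zip]; omega
      rw [List.getElem?_eq_getElem hi', List.getElem?_eq_getElem hj'] at he
      simp only [List.getElem_map, List.getElem_zip, Option.some.injEq, Prod.mk.injEq] at he
      refine ⟨i, j, hij, by omega, by omega, ?_, ?_⟩
      · rw [List.getD_eq_getElem fs 0 (by omega), List.getD_eq_getElem fs 0 (by omega),
          ← PySem.Int.mod_eq_emod_of_pos (by norm_num : (0:Int) < 12),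
          ← PySem.Int.mod_eq_emod_of_pos (by norm_num : (0:Int) < 12)]
        exact he.1
      · rw [List.getD_eq_getElem ts 0 (by omega), List.getD_eq_getElem ts 0 (by omega),
          ← PySem.Int.mod_eq_emod_of_pos (by norm_num : (0:Int) < 12),
          ← PySem.Int.mod_eq_emod_of_pos (by norm_num : (0:Int) < 12)]
        exact he.2
  · rintro ⟨a, b, hab, hbf, hbt, hf, ht⟩
    right
    rw [List.nodup_iff_getElem?_ne_getElem?]
    push_neg
    have ha' : a < ((fs.zip ts).map (fun p => ((PySem.Int.mod p.1 12, PySem.Int.mod p.2 12) : Int × Int))).length := by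
      simp only [List.length_map, List.length_zip]; omega
    have hb' : b < ((fs.zip ts).map (fun p => ((PySem.Int.mod p.1 12, PySem.Int.mod p.2 12) : Int × Int))).length := by
      simp only [List.length_map, List.length_zip]; omega
    refine ⟨a, b, hab, by simp only [List.length_map, List.length_zip]; omega, ?_⟩
    rw [List.getElem?_eq_getElem ha', List.getElem?_eq_getElem hb']
    simp only [List.getElem_map, List.getElem_zip, Option.some.injEq, Prod.mk.injEq]
    rw [List.getD_eq_getElem fs 0 (by omega), List.getD_eq_getElem fs 0 (by omega)] at hf
    rw [List.getD_eq_getElem ts 0 (by omega), List.getD_eq_getElem ts 0 (by omega)] at ht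
    exact ⟨by rw [PySem.Int.mod_eq_emod_of_pos (by norm_num : (0:Int) < 12),
            PySem.Int.mod_eq_emod_of_pos (by norm_num : (0:Int) < 12)]; exact hf,
          by rw [PySem.Int.mod_eq_emod_of_pos (by norm_num : (0:Int) < 12),
            PySem.Int.mod_eq_emod_of_pos (by norm_num : (0:Int) < 12)]; exact ht⟩

theorem pvGoB_short (l : List (Int × Int)) (hl : l.length ≤ 1) :
    pvGoB PySem.Set.empty l = false := by
  rcases l with _ | ⟨⟨f, t⟩, _ | ⟨q, rest⟩⟩
  · rfl
  · rfl
  · simp at hl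

-- ===== VERDICT (by name: the statement is the Claim_ definition above) =====
theorem check_parallel_octaves_py_spec : Claim_equal_check_parallel_octaves_py := by
  intro fv tv _ hpre
  unfold Spec_check_parallel_octaves_py
  rcases hpre with hlen | hsmall
  · have hl : (PySem.List.sorted fv (fun x => x) false).length ≤
        (PySem.List.sorted tv (fun x => x) false).length := by
      rw [PySem.List.length_sorted, PySem.List.length_sorted]; exact hlen
    have hA := pvA_iff (PySem.List.sorted fv (fun x => x) false)
      (PySem.List.sorted tv (fun x => x) false) hl
    have hB := pvB_iff (PySem.List.sorted fv (fun x => x) false)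
      (PySem.List.sorted tv (fun x => x) false)
    apply Bool.eq_iff_iff.mpr
    simp only [check_parallel_octaves_py, check_parallel_octaves_py_alt]
    exact hA.trans hB.symm
  · have h1 : check_parallel_octaves_py fv tv = false := by
      simp only [check_parallel_octaves_py]
      rw [PySem.List.pyRange_one_eq_nil
        (by rw [PySem.List.length_sorted]; omega)]
      rfl
    have h2 : check_parallel_octaves_py_alt fv tv = false := by
      simp only [check_parallel_octaves_py_alt]
      exact pvGoB_short _ (by
        simp only [List.length_zip, PySem.List.length_sorted]; omega)
    rw [h1, h2]
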